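-- pv_equiv track=rewrite | github.com/MythologIQ/QoreLogic | local_fortress/mcp_server/echo_detector.py | extract_ngrams
-- ===== SOURCE A (Python) =====
-- from typing import List, Tuple, Set, Optional
--
-- def extract_ngrams(tokens: List[str], n: int) -> Set[Tuple[str, ...]]:
--     """
--     Extract n-grams from a list of tokens.
--
--     Args:
--         tokens: List of word tokens
--         n: Size of n-grams
--
--     Returns:
--         Set of n-gram tuples
--     """
--     if len(tokens) < n:
--         return set()
--
--     ngrams = set()
--     for i in range(len(tokens) - n + 1):
--         ngram = tuple(tokens[i:i + n])
--         ngrams.add(ngram)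
--
--     return ngrams
-- ===== SOURCE B (Python) =====
-- def extract_ngrams(tokens, n):
--     if len(tokens) < n:
--         return set()
--     return set(zip(*(tokens[i:] for i in range(n))))
-- ===== Notes on version B (the rewrite author's own statement) =====
-- stated objective: idiomatic
-- what changed: Replaces the index loop that slices each window by position with the standard zip-of-shifted-views idiom: n offset views of the list are zipped column-wise to produce the n-grams in one expression.
-- outside the precondition, e.g. on extract_ngrams(['a'], 0): A returns {()}, B returns set(); on extract_ngrams(['a', 'b'], -1): A returns {(), ('a',)}, B returns set()
import Mathlib
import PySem

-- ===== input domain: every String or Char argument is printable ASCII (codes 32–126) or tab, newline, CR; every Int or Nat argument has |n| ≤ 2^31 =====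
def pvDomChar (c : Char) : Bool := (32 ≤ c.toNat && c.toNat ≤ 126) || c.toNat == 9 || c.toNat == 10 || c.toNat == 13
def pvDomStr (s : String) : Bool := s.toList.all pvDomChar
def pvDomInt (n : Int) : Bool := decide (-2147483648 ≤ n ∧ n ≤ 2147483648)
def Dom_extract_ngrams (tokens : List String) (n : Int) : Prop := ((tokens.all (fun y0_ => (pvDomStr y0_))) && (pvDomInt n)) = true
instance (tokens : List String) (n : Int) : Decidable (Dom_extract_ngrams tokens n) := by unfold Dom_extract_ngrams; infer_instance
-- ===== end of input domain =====

-- B builds the n-grams by zipping n shifted views of the token list instead of slicing each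
-- window by position (idiomatic zip(*...) transpose); return values agree for n ≥ 1.


-- ===== PORT A =====
def extract_ngrams (tokens : List String) (n : Int) : List (List String) :=
  if (tokens.length : Int) < n then []
  else
    (PySem.List.pyRange 0 ((tokens.length : Int) - n + 1) 1).foldl
      (fun ngrams i => PySem.Set.add ngrams (PySem.List.slice tokens (some i) (some (i + n))))
      PySem.Set.empty

-- ===== PORT B =====
-- zip(*cols): take the heads of all columns while every column is nonempty
def pyZipCols (cols : List (List String)) : List (List String) :=
  if h : cols.isEmpty || cols.any List.isEmpty then []
  else
    cols.map (fun c => c.headD "") :: pyZipCols (cols.map (fun c => c.drop 1))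
termination_by (cols.headD []).length
decreasing_by
  cases cols with
  | nil => simp at h
  | cons c cs =>
    simp only [List.isEmpty_iff, List.any_eq_true, Bool.or_eq_true] at h
    push_neg at h
    have hc : c ≠ [] := h.2 c (by simp)
    simp only [List.map_cons, List.headD_cons]
    cases c with
    | nil => exact absurd rfl hc
    | cons x xs => simp

def extract_ngrams_alt (tokens : List String) (n : Int) : List (List String) :=
  if (tokens.length : Int) < n then []
  else
    PySem.Set.ofList
      (pyZipCols ((PySem.List.pyRange 0 n 1).map (fun i => PySem.List.slice tokens (some i) none)))

-- ===== PRECONDITION & SPEC =====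
-- Pre_ excludes n ≤ 0: a degenerate n on which A's value ({()}, or odd mixed windows for
-- negative n via negative slice ends) is an accident of slicing and B's set() is as defensible.
def Pre_extract_ngrams (tokens : List String) (n : Int) : Prop := 1 ≤ n
instance (tokens : List String) (n : Int) : Decidable (Pre_extract_ngrams tokens n) := by unfold Pre_extract_ngrams; infer_instance
def pvWitness_extract_ngrams : List String × Int := (["a", "b", "a"], 2)

def Spec_extract_ngrams (tokens : List String) (n : Int) (out : List (List String)) : Prop := out = extract_ngrams_alt tokens n
instance (tokens : List String) (n : Int) (out : List (List String)) : Decidable (Spec_extract_ngrams tokens n out) := by unfold Spec_extract_ngrams; infer_instance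

-- ===== CLAIM (what is proved, stated in full; the proofs are below) =====
def Claim_equal_extract_ngrams : Prop := ∀ (tokens : List String) (n : Int), Dom_extract_ngrams tokens n → Pre_extract_ngrams tokens n → Spec_extract_ngrams tokens n (extract_ngrams tokens n)


-- ===== LEMMAS AND PROOFS =====

-- the common window sequence both programs enumerate, as a structural recursion
def wins (m : Nat) : List String → List (List String)
  | [] => []
  | t :: ts => if (t :: ts).length < m then [] else (t :: ts).take m :: wins m ts

lemma any_empty_of_short (l : List String) (m : Nat) (h : l.length < m) :
    ((List.range m).map (fun k => l.drop k)).any List.isEmpty = true := by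
  simp only [List.any_eq_true, List.mem_map]
  exact ⟨[], ⟨l.length, List.mem_range.mpr h, by simp⟩, by simp⟩

lemma no_empty_of_long (l : List String) (m : Nat) (hm : 1 ≤ m) (h : m ≤ l.length) :
    (((List.range m).map (fun k => l.drop k)).isEmpty
      || ((List.range m).map (fun k => l.drop k)).any List.isEmpty) = false := by
  simp only [Bool.or_eq_false_iff, List.any_eq_false, List.mem_map]
  constructor
  · simp [List.range_eq_nil]; omega
  · rintro x ⟨k, hk, rfl⟩
    simp only [List.mem_range] at hk
    simp [List.isEmpty_iff, List.drop_eq_nil_iff]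
    omega

-- heads of the m shifted views are the first m elements
lemma heads_shifted (l : List String) (m : Nat) (hm : m ≤ l.length) :
    (List.range m).map (fun k => (l.drop k).headD "") = l.take m := by
  apply List.ext_getElem
  · simp [hm]
  · intro j h1 h2
    simp only [List.getElem_map, List.getElem_range, List.getElem_take]
    have hj : j < l.length := by simp at h1; omega
    simp [List.headD_eq_head?_getD, List.head?_drop, hj]

-- B's zip of the m shifted views computes the window sequence
lemma zip_shifted (m : Nat) (hm : 1 ≤ m) (l : List String) :
    pyZipCols ((List.range m).map (fun k => l.drop k)) = wins m l := by
  induction l with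
  | nil =>
    rw [pyZipCols]
    simp [any_empty_of_short [] m (by simpa using hm), wins]
  | cons t ts ih =>
    by_cases hlen : (t :: ts).length < m
    · rw [pyZipCols]
      simp only [any_empty_of_short (t :: ts) m hlen, Bool.or_true, dite_true, wins]
      rw [if_pos hlen]
    · push_neg at hlen
      rw [pyZipCols]
      rw [dif_neg (by rw [no_empty_of_long (t :: ts) m hm hlen]; simp)]
      have htails : ((List.range m).map (fun k => (t :: ts).drop k)).map (fun c => c.drop 1)
          = (List.range m).map (fun k => ts.drop k) := by
        rw [List.map_map]
        apply List.map_congr_left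
        intro k _
        simp [List.drop_drop]
      have hheads : ((List.range m).map (fun k => (t :: ts).drop k)).map (fun c => c.headD "")
          = (t :: ts).take m := by
        rw [List.map_map]
        exact heads_shifted (t :: ts) m hlen
      rw [htails, hheads, ih, wins, if_neg (Nat.not_lt_of_ge hlen)]

-- A's indexed slicing computes the same window sequence
lemma slices_eq_wins (m : Nat) (hm : 1 ≤ m) (l : List String) (hlen : m ≤ l.length) :
    (List.range (l.length - m + 1)).map (fun k => (l.drop k).take m) = wins m l := by
  induction l with
  | nil => simp at hlen; omega
  | cons t ts ih =>
    rw [wins, if_neg (by simp at hlen ⊢; omega)]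
    by_cases hts : m ≤ ts.length
    · have h1 : (t :: ts).length - m + 1 = (ts.length - m + 1) + 1 := by
        simp only [List.length_cons]; omega
      rw [h1, List.range_succ_eq_map]
      simp only [List.map_cons, List.map_map, List.drop_zero]
      congr 1
      rw [← ih hts]
      apply List.map_congr_left
      intro k _
      simp [List.drop_drop, Nat.add_comm]
    · push_neg at hts
      have h1 : (t :: ts).length - m + 1 = 1 := by simp only [List.length_cons]; omega
      have h2 : wins m ts = [] := by
        cases ts with
        | nil => rw [wins]
        | cons u us => rw [wins, if_pos (by simp at hts ⊢; omega)]
      rw [h1, h2]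
      have hm' : m = ts.length + 1 := by simp at hlen; omega
      simp [hm']

-- ===== VERDICT (by name: the statement is the Claim_ definition above) =====
theorem extract_ngrams_spec : Claim_equal_extract_ngrams := by
  intro tokens n _ hpre
  unfold Spec_extract_ngrams extract_ngrams extract_ngrams_alt
  have hpre' : (1 : Int) ≤ n := hpre
  by_cases hlt : (tokens.length : Int) < n
  · rw [if_pos hlt, if_pos hlt]
  · rw [if_neg hlt, if_neg hlt]
    push_neg at hlt
    set m : Nat := n.toNat with hm
    have hn : n = (m : Int) := by omega
    have hm1 : 1 ≤ m := by omega
    have hml : m ≤ tokens.length := by omega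
    -- B's column list is the list of shifted views
    have hB : ((PySem.List.pyRange 0 n 1).map (fun i => PySem.List.slice tokens (some i) none))
        = (List.range m).map (fun k => tokens.drop k) := by
      rw [hn, PySem.List.pyRange_one, List.map_map]
      have h0 : ((m : Int) - 0).toNat = m := by omega
      rw [h0]
      apply List.map_congr_left
      intro k _
      simp [PySem.List.slice_from_natCast]
    -- A's slice list is the window sequence
    have hw : (PySem.List.pyRange 0 ((tokens.length : Int) - n + 1) 1).map
          (fun i => PySem.List.slice tokens (some i) (some (i + n)))
        = (List.range (tokens.length - m + 1)).map (fun k => (tokens.drop k).take m) := by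
      rw [hn, PySem.List.pyRange_one, List.map_map]
      have h0 : (((tokens.length : Int) - (m : Int) + 1) - 0).toNat = tokens.length - m + 1 := by
        omega
      rw [h0]
      apply List.map_congr_left
      intro k _
      simp [PySem.List.slice_natCast_add]
    calc (PySem.List.pyRange 0 ((tokens.length : Int) - n + 1) 1).foldl
          (fun ngrams i => PySem.Set.add ngrams (PySem.List.slice tokens (some i) (some (i + n))))
          PySem.Set.empty
        = ((PySem.List.pyRange 0 ((tokens.length : Int) - n + 1) 1).map
            (fun i => PySem.List.slice tokens (some i) (some (i + n)))).foldl
            PySem.Set.add PySem.Set.empty := by rw [List.foldl_map]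
      _ = PySem.Set.ofList ((List.range (tokens.length - m + 1)).map
            (fun k => (tokens.drop k).take m)) := by
            rw [hw, PySem.Set.ofList_eq_foldl]; rfl
      _ = PySem.Set.ofList (pyZipCols ((PySem.List.pyRange 0 n 1).map
            (fun i => PySem.List.slice tokens (some i) none))) := by
            rw [hB, zip_shifted m hm1 tokens, slices_eq_wins m hm1 tokens hml]
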